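-- pv_equiv track=rewrite | github.com/elkhaligy/LeetCode | 2486. Append Character.py | appendCharacters_bruteforce
-- ===== SOURCE A (Python) =====
-- def appendCharacters_bruteforce(s: str, t: str) -> int:
--     ans = 0
--     flag = False
--     for ind, chr in enumerate(t):
--
--         if s.find(chr) == -1:
--             ans = ind
--             flag = True
--             break
--         else:
--             s = s[s.find(chr) + 1:]
--
--     if ans == 0 and flag == True:
--         return len(t) - ans
--     elif ans != 0:
--         return len(t) - ans
--     else:
--         return 0
-- ===== SOURCE B (Python) =====
-- def appendCharacters_bruteforce(s: str, t: str) -> int: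
--     # single two-pointer pass: advance j through t whenever s yields t[j]
--     j = 0
--     n = len(t)
--     for c in s:
--         if j < n and c == t[j]:
--             j += 1
--     return n - j
-- ===== Notes on version B (the rewrite author's own statement) =====
-- stated objective: faster
-- what changed: Replaced the repeated str.find + slice-copy greedy loop over t with a single two-pointer scan over s that advances an index into t.
import Mathlib
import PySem

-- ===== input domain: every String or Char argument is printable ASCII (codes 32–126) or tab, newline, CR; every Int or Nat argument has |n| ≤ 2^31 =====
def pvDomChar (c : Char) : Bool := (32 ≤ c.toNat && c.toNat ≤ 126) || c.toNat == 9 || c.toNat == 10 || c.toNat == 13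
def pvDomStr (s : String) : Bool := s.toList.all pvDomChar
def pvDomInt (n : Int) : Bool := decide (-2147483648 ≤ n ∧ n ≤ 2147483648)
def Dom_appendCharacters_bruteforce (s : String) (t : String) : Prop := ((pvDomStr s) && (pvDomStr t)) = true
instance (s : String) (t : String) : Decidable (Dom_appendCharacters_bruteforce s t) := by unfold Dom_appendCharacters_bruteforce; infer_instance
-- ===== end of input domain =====

-- B replaces A's repeated str.find + slice-copy greedy loop over t by one two-pointer
-- scan over s advancing an index into t (same return value; faster by avoiding slice copies).

-- ===== PORT A =====
-- the 'for ind, chr in enumerate(t)' loop with break: carries the shrinking s and ind;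
-- returns (ans, flag) as left at loop exit (ans = 0, flag = False when no break fires)
def pvALoop (s : List Char) (t : List Char) (ind : Nat) : Int × Bool :=
  match t with
  | [] => (0, false)
  | c :: rest =>
    if PySem.Chars.find s [c] = -1 then ((ind : Int), true)
    else pvALoop (PySem.Chars.slice s (some (PySem.Chars.find s [c] + 1)) none) rest (ind + 1)

def appendCharacters_bruteforce (s : String) (t : String) : Int :=
  let r := pvALoop s.toList t.toList 0
  let ans := r.1
  let flag := r.2
  if ans = 0 ∧ flag = true then PySem.Chars.len t.toList - ans
  else if ans ≠ 0 then PySem.Chars.len t.toList - ans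
  else 0

-- ===== PORT B =====
-- 'for c in s: if j < len(t) and c == t[j]: j += 1' ; 't.toList[j]? = some c' is exactly
-- 'j < len(t) and c == t[j]'
def pvBStep (t : List Char) (j : Nat) (c : Char) : Nat :=
  if t[j]? = some c then j + 1 else j

def appendCharacters_bruteforce_alt (s : String) (t : String) : Int :=
  let j := s.toList.foldl (pvBStep t.toList) 0
  PySem.Chars.len t.toList - (j : Int)

-- ===== PRECONDITION & SPEC =====
def Spec_appendCharacters_bruteforce (s : String) (t : String) (out : Int) : Prop := out = appendCharacters_bruteforce_alt s t
instance (s : String) (t : String) (out : Int) : Decidable (Spec_appendCharacters_bruteforce s t out) := by unfold Spec_appendCharacters_bruteforce; infer_instance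

-- ===== CLAIM (what is proved, stated in full; the proofs are below) =====
def Claim_equal_appendCharacters_bruteforce : Prop := ∀ (s : String) (t : String), Dom_appendCharacters_bruteforce s t → Spec_appendCharacters_bruteforce s t (appendCharacters_bruteforce s t)

-- ===== LEMMAS AND PROOFS =====

-- greedy count written A's way (find + drop), as a plain Nat
def pvG : List Char → List Char → Nat
  | _, [] => 0
  | s, c :: rest =>
    if PySem.Chars.find s [c] = -1 then 0
    else 1 + pvG (s.drop ((PySem.Chars.find s [c]).toNat + 1)) rest

-- greedy count written B's way (structural two-pointer)
def pvF : List Char → List Char → Nat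
  | [], _ => 0
  | _ :: _, [] => 0
  | x :: s, c :: rest => if x = c then 1 + pvF s rest else pvF s (c :: rest)

theorem pvF_nil (s : List Char) : pvF s [] = 0 := by
  cases s <;> simp [pvF]

theorem pv_go_cons (c x : Char) (s : List Char) (k : Nat) :
    PySem.Chars.find.go [c] (x :: s) k =
      if c = x then (k : Int) else PySem.Chars.find.go [c] s (k + 1) := by
  by_cases h : c = x <;> simp [PySem.Chars.find.go, List.isPrefixOf, h]

theorem pv_go_eq (c : Char) (s : List Char) (k : Nat) :
    PySem.Chars.find.go [c] s k =
      if PySem.Chars.find s [c] = -1 then -1 else PySem.Chars.find s [c] + k := by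
  induction s generalizing k with
  | nil => simp [PySem.Chars.find, PySem.Chars.find.go]
  | cons x s ih =>
    have hb := PySem.Chars.neg_one_le_find s [c]
    have hfind : PySem.Chars.find (x :: s) [c] =
        if c = x then 0 else PySem.Chars.find.go [c] s 1 := by
      simp only [PySem.Chars.find]
      exact pv_go_cons c x s 0
    rw [pv_go_cons, hfind]
    by_cases h : c = x
    · simp [h]
    · simp only [h, if_false]
      rw [ih (k + 1), ih 1]
      split_ifs <;> omega

theorem pv_find_nonneg {s : List Char} {c : Char} (h : PySem.Chars.find s [c] ≠ -1) :
    0 ≤ PySem.Chars.find s [c] := by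
  have := PySem.Chars.neg_one_le_find s [c]
  omega

theorem pv_find_cons (x c : Char) (s : List Char) :
    PySem.Chars.find (x :: s) [c] =
      if x = c then 0
      else if PySem.Chars.find s [c] = -1 then -1 else PySem.Chars.find s [c] + 1 := by
  have hgo : PySem.Chars.find (x :: s) [c] =
      if c = x then (0 : Int) else PySem.Chars.find.go [c] s 1 := by
    simp only [PySem.Chars.find]
    exact pv_go_cons c x s 0
  rw [hgo, pv_go_eq]
  by_cases h : x = c
  · simp [h]
  · have h' : ¬ (c = x) := fun hh => h (Eq.symm hh)
    simp [h, h']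

-- B's structural count satisfies A's find-based recurrence
theorem pvF_find_step (c : Char) (rest : List Char) (s : List Char) :
    pvF s (c :: rest) =
      if PySem.Chars.find s [c] = -1 then 0
      else 1 + pvF (s.drop ((PySem.Chars.find s [c]).toNat + 1)) rest := by
  induction s with
  | nil => simp [pvF, PySem.Chars.find, PySem.Chars.find.go]
  | cons x s ih =>
    rw [pv_find_cons]
    by_cases hx : x = c
    · simp [pvF, hx]
    · by_cases hf : PySem.Chars.find s [c] = -1
      · simp [pvF, hx, hf, ih]
      · have h0 := pv_find_nonneg hf
        have hne1 : PySem.Chars.find s [c] + 1 ≠ -1 := by omega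
        have htn : (PySem.Chars.find s [c] + 1).toNat = (PySem.Chars.find s [c]).toNat + 1 := by
          omega
        simp only [hx, if_false, hf, hne1, htn]
        simp only [pvF, hx, if_false, ih, hf, if_false]
        simp [List.drop_succ_cons]

theorem pvG_eq_pvF (t s : List Char) : pvG s t = pvF s t := by
  induction t generalizing s with
  | nil => simp [pvG, pvF_nil]
  | cons c rest ih =>
    rw [pvF_find_step]
    simp only [pvG]
    by_cases hf : PySem.Chars.find s [c] = -1
    · simp [hf]
    · simp [hf, ih]

-- A's loop in terms of the greedy count
theorem pvALoop_eq (t : List Char) (s : List Char) (ind : Nat) :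
    pvALoop s t ind =
      if pvG s t = t.length then (0, false) else (((ind : Int) + pvG s t), true) := by
  induction t generalizing s ind with
  | nil => simp [pvALoop, pvG]
  | cons c rest ih =>
    by_cases hf : PySem.Chars.find s [c] = -1
    · have : pvG s (c :: rest) = 0 := by simp [pvG, hf]
      simp [pvALoop, hf, this]
    · have h0 := pv_find_nonneg hf
      have hslice : PySem.Chars.slice s (some (PySem.Chars.find s [c] + 1)) none =
          s.drop ((PySem.Chars.find s [c]).toNat + 1) := by
        rw [PySem.Chars.slice_eq_listSlice, PySem.List.slice_from _ (by omega)]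
        congr 1
        omega
      have hg : pvG s (c :: rest) = 1 + pvG (s.drop ((PySem.Chars.find s [c]).toNat + 1)) rest := by
        simp [pvG, hf]
      simp only [pvALoop, hf, if_false, hslice, ih, hg, List.length_cons]
      by_cases he : pvG (s.drop ((PySem.Chars.find s [c]).toNat + 1)) rest = rest.length
      · rw [if_pos he, if_pos (by omega)]
      · rw [if_neg he, if_neg (by omega)]
        simp only [Prod.mk.injEq]
        exact ⟨by push_cast; ring, trivial⟩

-- B's fold in terms of the two-pointer count
theorem pvFoldl_eq (t : List Char) (s : List Char) (j : Nat) :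
    s.foldl (pvBStep t) j = j + pvF s (t.drop j) := by
  induction s generalizing j with
  | nil => simp [pvF]
  | cons x s ih =>
    simp only [List.foldl_cons]
    rcases hj : t[j]? with _ | c
    · have hlen : t.length ≤ j := by
        rcases Nat.lt_or_ge j t.length with h | h
        · simp [List.getElem?_eq_getElem h] at hj
        · exact h
      have hd : t.drop j = [] := List.drop_eq_nil_of_le hlen
      have hstep : pvBStep t j x = j := by simp [pvBStep, hj]
      rw [hstep, ih, hd]
      rw [pvF_nil s, pvF_nil (x :: s)]
    · have hjlt : j < t.length := by
        rcases Nat.lt_or_ge j t.length with h | h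
        · exact h
        · rw [List.getElem?_eq_none h] at hj
          exact absurd hj (by simp)
      have hjc : t[j] = c := by
        have := List.getElem?_eq_getElem hjlt
        rw [this] at hj
        exact Option.some_injective _ hj
      have hdrop : t.drop j = c :: t.drop (j + 1) := by
        rw [List.drop_eq_getElem_cons hjlt, hjc]
      by_cases hc : x = c
      · have hstep : pvBStep t j x = j + 1 := by simp [pvBStep, hj, hc]
        rw [hstep, ih, hdrop]
        simp [pvF, hc]
        omega
      · have hcx : ¬ (c = x) := fun h => hc (Eq.symm h)
        have hstep : pvBStep t j x = j := by simp [pvBStep, hj, hcx]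
        rw [hstep, ih, hdrop]
        simp [pvF, hc]

-- ===== VERDICT (by name: the statement is the Claim_ definition above) =====
theorem appendCharacters_bruteforce_spec : Claim_equal_appendCharacters_bruteforce := by
  intro s t _
  unfold Spec_appendCharacters_bruteforce appendCharacters_bruteforce appendCharacters_bruteforce_alt
  rw [pvFoldl_eq t.toList s.toList 0]
  simp only [List.drop_zero, Nat.zero_add]
  rw [← pvG_eq_pvF]
  rw [pvALoop_eq]
  by_cases hfull : pvG s.toList t.toList = t.toList.length
  · simp only [hfull, if_true]
    simp [PySem.Chars.len_eq]
  · simp only [hfull, if_false]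
    by_cases h0 : pvG s.toList t.toList = 0
    · simp [h0]
    · simp [h0]
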